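-- pv_equiv track=rewrite | github.com/pmesgari/adventofcodde | 2025/day9.py | rect_crosses_boundary
-- ===== SOURCE A (Python) =====
-- def segments_intersect(seg1, seg2):
--     (x1, y1), (x2, y2) = seg1
--     (x3, y3), (x4, y4) = seg2
--
--     if x1 == x2 and y3 == y4:
--         return (x3 < x1 < x4) and (y1 < y3 < y2)
--     elif y1 == y2 and x3 == x4:
--         return (x1 < x3 < x2) and (y3 < y1 < y4)
--
--     return False
--
-- def rect_crosses_boundary(p1, p2, boundary_segments):
--     x1, y1 = p1
--     x2, y2 = p2
--
--     xmin = min(x1, x2)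
--     ymin = min(y1, y2)
--     xmax = max(x1, x2)
--     ymax = max(y1, y2)
--
--     rect_segments = [
--         ((xmin, ymin), (xmax, ymin)),
--         ((xmax, ymin), (xmax, ymax)),
--         ((xmin, ymax), (xmax, ymax)),
--         ((xmin, ymin), (xmin, ymax)),
--     ]
--
--     for seg1 in rect_segments:
--         for seg2 in boundary_segments:
--             if segments_intersect(seg1, seg2):
--                 return True
--
--     return False
-- ===== SOURCE B (Python) =====
-- def rect_crosses_boundary(p1, p2, boundary_segments):
--     x1, y1 = p1
--     x2, y2 = p2
--     xmin, xmax = min(x1, x2), max(x1, x2)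
--     ymin, ymax = min(y1, y2), max(y1, y2)
--     for (x3, y3), (x4, y4) in boundary_segments:
--         if y3 == y4:
--             # horizontal boundary segment vs the two vertical rectangle edges
--             if ymin < y3 < ymax and (x3 < xmin < x4 or x3 < xmax < x4):
--                 return True
--         elif x3 == x4:
--             # vertical boundary segment vs the two horizontal rectangle edges
--             if xmin < x3 < xmax and (y3 < ymin < y4 or y3 < ymax < y4):
--                 return True
--     return False
-- ===== Notes on version B (the rewrite author's own statement) =====
-- stated objective: simpler
-- what changed: Single pass over boundary_segments with an inlined orientation dispatch (horizontal vs vertical) replacing the rect_segments list, the generic segments_intersect helper and the nested double loop.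
import Mathlib
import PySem

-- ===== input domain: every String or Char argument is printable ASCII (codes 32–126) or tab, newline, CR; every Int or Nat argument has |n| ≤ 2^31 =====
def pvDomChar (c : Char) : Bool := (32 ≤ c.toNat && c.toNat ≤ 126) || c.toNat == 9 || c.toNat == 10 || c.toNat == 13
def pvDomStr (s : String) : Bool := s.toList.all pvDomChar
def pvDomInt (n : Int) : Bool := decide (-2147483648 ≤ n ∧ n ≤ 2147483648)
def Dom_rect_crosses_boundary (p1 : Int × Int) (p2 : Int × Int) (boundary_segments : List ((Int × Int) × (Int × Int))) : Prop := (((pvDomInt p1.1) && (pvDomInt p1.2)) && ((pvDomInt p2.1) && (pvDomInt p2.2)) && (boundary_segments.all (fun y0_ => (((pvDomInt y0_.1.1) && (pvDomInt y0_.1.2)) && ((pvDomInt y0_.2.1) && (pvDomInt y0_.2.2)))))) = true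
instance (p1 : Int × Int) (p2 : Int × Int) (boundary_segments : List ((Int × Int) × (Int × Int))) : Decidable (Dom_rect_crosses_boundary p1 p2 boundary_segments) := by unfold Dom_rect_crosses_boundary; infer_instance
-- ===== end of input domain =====

-- B: one pass over boundary_segments with inlined orientation dispatch, replacing A's
-- rect_segments list + generic helper + nested double loop (objective: simpler).

-- ===== PORT A =====
def segments_intersect (seg1 seg2 : (Int × Int) × (Int × Int)) : Bool :=
  let ((x1, y1), (x2, y2)) := seg1
  let ((x3, y3), (x4, y4)) := seg2
  if x1 == x2 && y3 == y4 then
    (decide (x3 < x1) && decide (x1 < x4)) && (decide (y1 < y3) && decide (y3 < y2))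
  else if y1 == y2 && x3 == x4 then
    (decide (x1 < x3) && decide (x3 < x2)) && (decide (y3 < y1) && decide (y1 < y4))
  else
    false

def rect_crosses_boundary (p1 : Int × Int) (p2 : Int × Int) (boundary_segments : List ((Int × Int) × (Int × Int))) : Bool :=
  let (x1, y1) := p1
  let (x2, y2) := p2
  let xmin := min x1 x2
  let ymin := min y1 y2
  let xmax := max x1 x2
  let ymax := max y1 y2
  let rect_segments : List ((Int × Int) × (Int × Int)) :=
    [ ((xmin, ymin), (xmax, ymin)),
      ((xmax, ymin), (xmax, ymax)),
      ((xmin, ymax), (xmax, ymax)),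
      ((xmin, ymin), (xmin, ymax)) ]
  rect_segments.any (fun seg1 => boundary_segments.any (fun seg2 => segments_intersect seg1 seg2))

-- ===== PORT B =====
def rect_crosses_boundary_alt (p1 : Int × Int) (p2 : Int × Int) (boundary_segments : List ((Int × Int) × (Int × Int))) : Bool :=
  let (x1, y1) := p1
  let (x2, y2) := p2
  let xmin := min x1 x2
  let xmax := max x1 x2
  let ymin := min y1 y2
  let ymax := max y1 y2
  boundary_segments.any (fun seg =>
    let ((x3, y3), (x4, y4)) := seg
    if y3 == y4 then
      (decide (ymin < y3) && decide (y3 < ymax)) &&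
        ((decide (x3 < xmin) && decide (xmin < x4)) || (decide (x3 < xmax) && decide (xmax < x4)))
    else if x3 == x4 then
      (decide (xmin < x3) && decide (x3 < xmax)) &&
        ((decide (y3 < ymin) && decide (ymin < y4)) || (decide (y3 < ymax) && decide (ymax < y4)))
    else
      false)

-- ===== PRECONDITION & SPEC =====
def Spec_rect_crosses_boundary (p1 : Int × Int) (p2 : Int × Int) (boundary_segments : List ((Int × Int) × (Int × Int))) (out : Bool) : Prop := out = rect_crosses_boundary_alt p1 p2 boundary_segments
instance (p1 : Int × Int) (p2 : Int × Int) (boundary_segments : List ((Int × Int) × (Int × Int))) (out : Bool) : Decidable (Spec_rect_crosses_boundary p1 p2 boundary_segments out) := by unfold Spec_rect_crosses_boundary; infer_instance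

-- ===== CLAIM (what is proved, stated in full; the proofs are below) =====
def Claim_equal_rect_crosses_boundary : Prop := ∀ (p1 : Int × Int) (p2 : Int × Int) (boundary_segments : List ((Int × Int) × (Int × Int))), Dom_rect_crosses_boundary p1 p2 boundary_segments → Spec_rect_crosses_boundary p1 p2 boundary_segments (rect_crosses_boundary p1 p2 boundary_segments)

-- ===== LEMMAS AND PROOFS =====

-- OR of two anys over the same list equals one any of the pointwise OR.
theorem any_or_any {α : Type} (l : List α) (f g : α → Bool) :
    (l.any f || l.any g) = l.any (fun x => f x || g x) := by
  induction l with
  | nil => simp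
  | cons h t ih =>
    simp only [List.any_cons, ← ih]
    cases f h <;> cases g h <;> simp

-- Pointwise: the disjunction of A's four edge tests against one boundary segment
-- equals B's inlined orientation test.
theorem pointwise (x1 y1 x2 y2 : Int) (seg : (Int × Int) × (Int × Int)) :
    (segments_intersect ((min x1 x2, min y1 y2), (max x1 x2, min y1 y2)) seg ||
     segments_intersect ((max x1 x2, min y1 y2), (max x1 x2, max y1 y2)) seg ||
     segments_intersect ((min x1 x2, max y1 y2), (max x1 x2, max y1 y2)) seg ||
     segments_intersect ((min x1 x2, min y1 y2), (min x1 x2, max y1 y2)) seg)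
    =
    (let ((x3, y3), (x4, y4)) := seg
     if y3 == y4 then
       (decide (min y1 y2 < y3) && decide (y3 < max y1 y2)) &&
         ((decide (x3 < min x1 x2) && decide (min x1 x2 < x4)) || (decide (x3 < max x1 x2) && decide (max x1 x2 < x4)))
     else if x3 == x4 then
       (decide (min x1 x2 < x3) && decide (x3 < max x1 x2)) &&
         ((decide (y3 < min y1 y2) && decide (min y1 y2 < y4)) || (decide (y3 < max y1 y2) && decide (max y1 y2 < y4)))
     else
       false) := by
  obtain ⟨⟨x3, y3⟩, ⟨x4, y4⟩⟩ := seg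
  simp only [segments_intersect]
  apply Bool.eq_iff_iff.mpr
  constructor
  · intro h
    simp only [Bool.or_eq_true, Bool.and_eq_true, beq_iff_eq] at h ⊢
    split_ifs at h ⊢ <;> simp_all <;> omega
  · intro h
    simp only [Bool.or_eq_true, Bool.and_eq_true, beq_iff_eq] at h ⊢
    split_ifs at h ⊢ <;> simp_all <;> omega

-- ===== VERDICT (by name: the statement is the Claim_ definition above) =====
theorem rect_crosses_boundary_spec : Claim_equal_rect_crosses_boundary := by
  intro ⟨x1, y1⟩ ⟨x2, y2⟩ bs _
  unfold Spec_rect_crosses_boundary rect_crosses_boundary rect_crosses_boundary_alt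
  simp only [List.any_cons, List.any_nil, Bool.or_false]
  rw [any_or_any, any_or_any, any_or_any]
  refine List.any_congr rfl (fun seg => ?_)
  simpa [Bool.or_assoc] using pointwise x1 y1 x2 y2 seg
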